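-- pv_equiv track=rewrite | github.com/ROOTXBOT2/CODE | 프로그래머스/unrated/181932. 코드 처리하기/코드 처리하기.py | solution
-- ===== SOURCE A (Python) =====
-- def solution(code):
--     answer = ''
--     mode = 0
--     for idx in range(len(code)):
--         if code[idx] =="1":
--             if mode == 1:
--                 mode = 0
--             else:
--                 mode = 1
--         else:
--             if mode == 0:
--                 if idx % 2 == 0:
--                     answer = answer + code[idx]
--             else:
--                 if idx % 2 == 1:
--                     answer = answer + code[idx]
--     if answer == "":
--         return "EMPTY"
--     return answer
-- ===== SOURCE B (Python) =====
-- def solution(code):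
--     # prefix table: ones[i] = number of '1' characters in code[:i]
--     ones = [0]
--     for ch in code:
--         ones.append(ones[-1] + (ch == '1'))
--     picked = ''.join(code[i] for i in range(len(code))
--                      if code[i] != '1' and i % 2 == ones[i] % 2)
--     return picked or 'EMPTY'
-- ===== Notes on version B (the rewrite author's own statement) =====
-- stated objective: alternative
-- what changed: Replaces the stateful toggle-mode loop by a prefix-parity table ('1'-count before each index) plus a single filtering comprehension over indices.
import Mathlib
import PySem

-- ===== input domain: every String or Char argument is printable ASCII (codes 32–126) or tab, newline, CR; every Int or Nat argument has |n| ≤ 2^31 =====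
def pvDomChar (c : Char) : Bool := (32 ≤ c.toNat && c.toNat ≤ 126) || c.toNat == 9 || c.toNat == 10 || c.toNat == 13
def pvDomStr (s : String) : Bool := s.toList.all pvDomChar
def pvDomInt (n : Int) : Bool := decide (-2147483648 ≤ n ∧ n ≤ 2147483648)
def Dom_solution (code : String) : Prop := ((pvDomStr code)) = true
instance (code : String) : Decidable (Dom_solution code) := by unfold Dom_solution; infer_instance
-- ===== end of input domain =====

-- B replaces A's stateful toggle-mode loop by a prefix-parity table plus one
-- filtering pass over the indices (alternative decomposition, same cost class).

-- ===== PORT A =====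
-- the loop 'for idx in range(len(code))' as structural recursion over the
-- characters, carrying (idx, answer, mode) exactly as A does
def solA : List Char → Nat → List Char → Nat → List Char
  | [], _, answer, _ => answer
  | c :: rest, idx, answer, mode =>
    if c = '1' then
      solA rest (idx + 1) answer (if mode = 1 then 0 else 1)
    else if mode = 0 then
      solA rest (idx + 1) (if idx % 2 = 0 then answer ++ [c] else answer) mode
    else
      solA rest (idx + 1) (if idx % 2 = 1 then answer ++ [c] else answer) mode

def solution (code : String) : String :=
  if solA code.toList 0 [] 0 = [] then "EMPTY"
  else String.ofList (solA code.toList 0 [] 0)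

-- ===== PORT B =====
-- ones[i] = number of '1' characters in code[:i], built exactly as Source B builds it
def onesTable (cs : List Char) : List Nat :=
  cs.foldl (fun acc ch => acc ++ [acc.getLast! + (if ch = '1' then 1 else 0)]) [0]

-- the filtering comprehension of Source B
def pickedOf (cs : List Char) : List Char :=
  ((List.range cs.length).filter
      (fun i => cs.getD i ' ' ≠ '1' ∧ i % 2 = (onesTable cs).getD i 0 % 2)).map
    (fun i => cs.getD i ' ')

def solution_alt (code : String) : String :=
  if pickedOf code.toList = [] then "EMPTY"
  else String.ofList (pickedOf code.toList)

-- ===== PRECONDITION & SPEC =====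
def Spec_solution (code : String) (out : String) : Prop := out = solution_alt code
instance (code : String) (out : String) : Decidable (Spec_solution code out) := by unfold Spec_solution; infer_instance

-- ===== CLAIM (what is proved, stated in full; the proofs are below) =====
def Claim_equal_solution : Prop := ∀ (code : String), Dom_solution code → Spec_solution code (solution code)

-- ===== LEMMAS AND PROOFS =====

-- middle spec: characters picked from index k onward, p = number of '1's seen so far
def spec : List Char → Nat → Nat → List Char
  | [], _, _ => []
  | c :: cs, k, p =>
    if c = '1' then spec cs (k + 1) (p + 1)
    else (if k % 2 = p % 2 then [c] else []) ++ spec cs (k + 1) p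

def cntOnes (cs : List Char) : Nat := (cs.filter (· = '1')).length

def partialSums : Nat → List Char → List Nat
  | _, [] => []
  | p, c :: cs =>
    let p' := p + (if c = '1' then 1 else 0)
    p' :: partialSums p' cs

lemma solA_eq_spec : ∀ (cs : List Char) (k p : Nat) (acc : List Char),
    solA cs k acc (p % 2) = acc ++ spec cs k p := by
  intro cs
  induction cs with
  | nil => intro k p acc; simp [solA, spec]
  | cons c rest ih =>
    intro k p acc
    by_cases h1 : c = '1'
    · have hm : (if p % 2 = 1 then 0 else 1) = (p + 1) % 2 := by
        rcases Nat.mod_two_eq_zero_or_one p with hp | hp <;> simp [hp] <;> omega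
      rw [show solA (c :: rest) k acc (p % 2) =
            solA rest (k + 1) acc (if p % 2 = 1 then 0 else 1) from by simp [solA, h1]]
      rw [hm, ih]
      simp [spec, h1]
    · rcases Nat.mod_two_eq_zero_or_one p with hp | hp
      · rw [hp]
        rw [show solA (c :: rest) k acc 0 =
              solA rest (k + 1) (if k % 2 = 0 then acc ++ [c] else acc) 0 from by
            simp [solA, h1]]
        have h2 := ih (k + 1) p (if k % 2 = 0 then acc ++ [c] else acc)
        rw [hp] at h2
        rw [h2]
        by_cases hk : k % 2 = 0 <;> simp [spec, h1, hp, hk]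
      · rw [hp]
        rw [show solA (c :: rest) k acc 1 =
              solA rest (k + 1) (if k % 2 = 1 then acc ++ [c] else acc) 1 from by
            simp [solA, h1]]
        have h2 := ih (k + 1) p (if k % 2 = 1 then acc ++ [c] else acc)
        rw [hp] at h2
        rw [h2]
        by_cases hk : k % 2 = 1 <;> simp [spec, h1, hp, hk]

lemma cntOnes_cons (c : Char) (cs : List Char) :
    cntOnes (c :: cs) = (if c = '1' then 1 else 0) + cntOnes cs := by
  by_cases h1 : c = '1' <;> simp [cntOnes, h1]; omega

lemma spec_eq_filter : ∀ (cs : List Char) (k p : Nat),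
    spec cs k p =
      ((List.range cs.length).filter
          (fun j => cs.getD j ' ' ≠ '1' ∧ (k + j) % 2 = (p + cntOnes (cs.take j)) % 2)).map
        (fun j => cs.getD j ' ') := by
  intro cs
  induction cs with
  | nil => intro k p; simp [spec]
  | cons c rest ih =>
    intro k p
    have hfun : ((fun j => (c :: rest).getD j ' ') ∘ Nat.succ) = (fun j => rest.getD j ' ') :=
      funext fun j => by simp
    have hpred : ((fun j => decide ((c :: rest).getD j ' ' ≠ '1' ∧
            (k + j) % 2 = (p + cntOnes ((c :: rest).take j)) % 2)) ∘ Nat.succ) =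
        (fun j => decide (rest.getD j ' ' ≠ '1' ∧
            ((k + 1) + j) % 2 = ((p + (if c = '1' then 1 else 0)) + cntOnes (rest.take j)) % 2)) := by
      funext j
      simp only [Function.comp_apply, decide_eq_decide, List.getD_cons_succ, List.take_succ_cons,
        cntOnes_cons]
      constructor <;> rintro ⟨ha, hb⟩ <;> exact ⟨ha, by omega⟩
    rw [List.length_cons, List.range_succ_eq_map, List.filter_cons]
    by_cases h0 : ((c :: rest).getD 0 ' ' ≠ '1' ∧ (k + 0) % 2 = (p + cntOnes ((c :: rest).take 0)) % 2)
    · rw [if_pos (by simpa using h0)]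
      rw [List.filter_map, hpred, List.map_cons, List.map_map, hfun, ← ih]
      obtain ⟨ha, hb⟩ := h0
      have h1 : c ≠ '1' := by simpa using ha
      have hk : k % 2 = p % 2 := by simpa [cntOnes] using hb
      have hd : p + (if c = '1' then 1 else 0) = p := by simp [h1]
      simp [spec, h1, hk]
    · rw [if_neg (by simpa using h0)]
      rw [List.filter_map, hpred, List.map_map, hfun, ← ih]
      by_cases h1 : c = '1'
      · simp [spec, h1]
      · have hk : ¬ k % 2 = p % 2 := by
          intro h
          exact h0 ⟨by simpa using h1, by simpa [cntOnes] using h⟩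
        have hd : p + (if c = '1' then 1 else 0) = p := by simp [h1]
        simp [spec, h1, hk]

lemma onesFold : ∀ (cs : List Char) (acc : List Nat) (p : Nat),
    acc.getLast?.getD 0 = p →
    cs.foldl (fun acc ch => acc ++ [acc.getLast! + (if ch = '1' then 1 else 0)]) acc =
      acc ++ partialSums p cs := by
  intro cs
  induction cs with
  | nil => intro acc p _; simp [partialSums]
  | cons c rest ih =>
    intro acc p hlast
    simp only [List.foldl_cons, partialSums]
    rw [ih (acc ++ [acc.getLast! + (if c = '1' then 1 else 0)]) (p + (if c = '1' then 1 else 0))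
        (by simp [hlast])]
    simp [hlast, List.append_assoc]

lemma partialSums_getD : ∀ (cs : List Char) (p j : Nat), j < cs.length →
    (partialSums p cs).getD j 0 = p + cntOnes (cs.take (j + 1)) := by
  intro cs
  induction cs with
  | nil => intro p j h; simp at h
  | cons c rest ih =>
    intro p j h
    cases j with
    | zero => by_cases h1 : c = '1' <;> simp [partialSums, cntOnes, h1]
    | succ j =>
      have := ih (p + (if c = '1' then 1 else 0)) j (by simpa using h)
      simp only [partialSums, List.getD_cons_succ, List.take_succ_cons, cntOnes_cons] at this ⊢
      omega

lemma onesTable_getD (cs : List Char) (j : Nat) (hj : j < cs.length) :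
    (onesTable cs).getD j 0 = cntOnes (cs.take j) := by
  unfold onesTable
  rw [onesFold cs [0] 0 (by simp)]
  cases j with
  | zero => simp [cntOnes]
  | succ j =>
    have h' : j < cs.length := by omega
    simpa using partialSums_getD cs 0 j h'

-- ===== VERDICT (by name: the statement is the Claim_ definition above) =====
theorem solution_spec : Claim_equal_solution := by
  intro code _
  have hA : solA code.toList 0 [] 0 = spec code.toList 0 0 := by
    simpa using solA_eq_spec code.toList 0 0 []
  have hB : pickedOf code.toList = spec code.toList 0 0 := by
    unfold pickedOf
    rw [spec_eq_filter code.toList 0 0]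
    congr 1
    apply List.filter_congr
    intro j hj
    have hj' := List.mem_range.mp hj
    simp only [decide_eq_decide]
    rw [onesTable_getD code.toList j hj']
    simp
  show solution code = solution_alt code
  unfold solution solution_alt
  rw [hA, hB]
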